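-- pv_equiv track=rewrite | github.com/jvdoorne/advent-of-code | 2022/day07/sol07.py | parse
-- ===== SOURCE A (Python) =====
-- from collections import defaultdict
--
-- def parse(commands: list) -> defaultdict:
--     parsed, stack = defaultdict(int), list()
--     for line in commands:
--         match line.split(' '):
--             # Dir operations
--             case '$', 'cd', '..':
--                 stack.pop()
--             case '$', 'cd', d:
--                 stack.append(d)
--             # No adction needed
--             case '$', 'ls':
--                 pass
--             case 'dir', _:
--                 pass
--             # File operations
--             case size, _:
--                 # Add size for child & update size for all parents
--                 for i in range(1, len(stack) + 1):
--                     parsed['/'.join(stack[:i])] += int(size)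
--
--     return parsed
-- ===== SOURCE B (Python) =====
-- from collections import defaultdict
--
-- def parse(commands: list) -> defaultdict:
--     # Phase 1: one walk over the log, crediting each file's size only to the
--     # directory it sits in (a table of direct totals keyed by the path tuple).
--     direct, stack = defaultdict(int), list()
--     for line in commands:
--         match line.split(' '):
--             case '$', 'cd', '..':
--                 stack.pop()
--             case '$', 'cd', d:
--                 stack.append(d)
--             case '$', 'ls':
--                 pass
--             case 'dir', _:
--                 pass
--             case size, _ if stack:
--                 direct[tuple(stack)] += int(size)
--     # Phase 2: push each directory's direct total up to it and all its
--     # ancestors, rebuilding the prefix paths incrementally.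
--     parsed = defaultdict(int)
--     for path, total in direct.items():
--         cur = None
--         for name in path:
--             cur = name if cur is None else cur + '/' + name
--             parsed[cur] += total
--     return parsed
-- ===== Notes on version B (the rewrite author's own statement) =====
-- stated objective: alternative
-- what changed: B splits A's single pass into two stages: stage 1 credits each file's size once, to a defaultdict of direct totals keyed by the current path tuple (no slicing, no join, no per-ancestor update while walking the log); stage 2 folds each distinct directory's direct total into it and its ancestors, rebuilding prefix paths incrementally, so the per-ancestor work runs once per distinct directory instead of once per file line.
import Mathlib
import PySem

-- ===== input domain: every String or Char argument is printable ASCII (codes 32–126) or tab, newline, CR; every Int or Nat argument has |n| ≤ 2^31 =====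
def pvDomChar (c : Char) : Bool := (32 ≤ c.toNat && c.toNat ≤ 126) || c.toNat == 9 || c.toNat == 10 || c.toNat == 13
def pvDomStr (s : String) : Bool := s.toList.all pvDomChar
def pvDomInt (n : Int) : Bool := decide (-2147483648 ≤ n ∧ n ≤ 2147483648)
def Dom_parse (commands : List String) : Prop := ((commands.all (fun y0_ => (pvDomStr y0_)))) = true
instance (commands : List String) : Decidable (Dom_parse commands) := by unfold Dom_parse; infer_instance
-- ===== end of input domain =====

-- B replaces A's per-file ancestor loop (stack slice + '/'.join + dict update per
-- ancestor, per file) by two stages: stage 1 credits each file's size once, to a table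
-- of direct totals keyed by the current path tuple; stage 2 folds each direct total
-- into the directory and its ancestors, rebuilding prefix paths incrementally;
-- return-value equivalence (same dict, same insertion order).

-- ===== PORT A =====
-- one iteration of A's loop; state = (parsed, stack).  defaultdict's `parsed[k] += v` is
-- Dict.modify k 0 (· + v); int(size) is ofStr? (its getD 0 is unreachable under Pre_,
-- where Python raises ValueError); line.split(' ') is split? (some: sep ≠ "").
def parseStepA (acc : PySem.Dict String Int × List String) (line : String) :
    PySem.Dict String Int × List String :=
  let parsed := acc.1
  let stack := acc.2
  match (PySem.Str.split? line " ").getD [] with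
  | ["$", "cd", ".."] => (parsed, stack.dropLast)        -- stack.pop()
  | ["$", "cd", d]    => (parsed, stack ++ [d])          -- stack.append(d)
  | ["$", "ls"]       => (parsed, stack)
  | ["dir", _]        => (parsed, stack)
  | [size, _]         =>
      ((PySem.List.pyRange 1 ((stack.length : Int) + 1) 1).foldl
        (fun p i =>
          p.modify (PySem.Str.join "/" (PySem.List.slice stack none (some i))) 0
            (· + (PySem.Int.ofStr? size).getD 0)) parsed,
       stack)
  | _ => (parsed, stack)

def parse (commands : List String) : List (String × Int) :=
  (commands.foldl parseStepA (PySem.Dict.empty, [])).1.items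

-- ===== PORT B =====
-- stage-1 iteration of B's loop; state = (direct, stack); `direct[tuple(stack)] += int(size)`
-- is Dict.modify on the List-String key; the `if stack` match guard is the isEmpty test.
def parseStepB (acc : PySem.Dict (List String) Int × List String) (line : String) :
    PySem.Dict (List String) Int × List String :=
  let direct := acc.1
  let stack := acc.2
  match (PySem.Str.split? line " ").getD [] with
  | ["$", "cd", ".."] => (direct, stack.dropLast)        -- stack.pop()
  | ["$", "cd", d]    => (direct, stack ++ [d])          -- stack.append(d)
  | ["$", "ls"]       => (direct, stack)
  | ["dir", _]        => (direct, stack)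
  | [size, _]         =>
      if stack.isEmpty then (direct, stack)
      else (direct.modify stack 0 (· + (PySem.Int.ofStr? size).getD 0), stack)
  | _ => (direct, stack)

-- stage-2 inner loop: `cur = name if cur is None else cur + '/' + name; parsed[cur] += total`;
-- string concatenation is Str.join "" (exact; Lean's own String.append is kernel-opaque)
def addPath (parsed : PySem.Dict String Int) (path : List String) (total : Int) :
    PySem.Dict String Int :=
  (path.foldl
    (fun st name =>
      let cur := match st.2 with
        | none => name
        | some c => PySem.Str.join "" [c, "/", name]
      (st.1.modify cur 0 (· + total), some cur))
    (parsed, (none : Option String))).1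

def parse_alt (commands : List String) : List (String × Int) :=
  let direct := (commands.foldl parseStepB (PySem.Dict.empty, [])).1
  (direct.items.foldl (fun parsed pt => addPath parsed pt.1 pt.2) PySem.Dict.empty).items

-- ===== PRECONDITION & SPEC =====
-- Python A raises exactly when a '$ cd ..' line pops an empty stack (IndexError) or a
-- 2-token file line is reached with a nonempty stack and a first token that int()
-- rejects (ValueError); preOk tracks only the directory depth to rule those out.
def preOk : Nat → List String → Bool
  | _, [] => true
  | depth, line :: rest =>
    match (PySem.Str.split? line " ").getD [] with
    | ["$", "cd", ".."] =>
        match depth with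
        | 0 => false
        | d + 1 => preOk d rest
    | ["$", "cd", _] => preOk (depth + 1) rest
    | ["$", "ls"]    => preOk depth rest
    | ["dir", _]     => preOk depth rest
    | [size, _]      => (depth == 0 || (PySem.Int.ofStr? size).isSome) && preOk depth rest
    | _ => preOk depth rest

def Pre_parse (commands : List String) : Prop := preOk 0 commands = true
instance (commands : List String) : Decidable (Pre_parse commands) := by
  unfold Pre_parse; infer_instance

def pvWitness_parse : List String :=
  ["$ cd /", "$ ls", "dir a", "100 b.txt", "$ cd a", "200 c.txt", "$ cd .."]

def Spec_parse (commands : List String) (out : List (String × Int)) : Prop := out = parse_alt commands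
instance (commands : List String) (out : List (String × Int)) : Decidable (Spec_parse commands out) := by unfold Spec_parse; infer_instance

-- ===== CLAIM (what is proved, stated in full; the proofs are below) =====
def Claim_equal_parse : Prop := ∀ (commands : List String), Dom_parse commands → Pre_parse commands → Spec_parse commands (parse commands)

-- ===== LEMMAS AND PROOFS =====
-- The two ports in fact agree on every input list (the invariant below needs no
-- precondition); Pre_parse marks where the Python A returns at all, and the proof of
-- the claim simply carries it.

-- A's per-file key sequence: the '/'-joined nonempty prefixes of the stack, in order
def pathsOf (stack : List String) : List String :=
  (List.range stack.length).map (fun i => PySem.Str.join "/" (stack.take (i + 1)))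

-- B's stage-2 key sequence: the prefix paths rebuilt incrementally from cur
def prefixKeys : Option String → List String → List String
  | _, [] => []
  | cur, n :: rest =>
      let c := match cur with
        | none => n
        | some c0 => PySem.Str.join "" [c0, "/", n]
      c :: prefixKeys (some c) rest

-- adding v at every key of ks in order (the shape shared by A's inner loop and stage 2)
def foldMAdd (ks : List String) (v : Int) (p : PySem.Dict String Int) :
    PySem.Dict String Int :=
  ks.foldl (fun p k => p.modify k 0 (· + v)) p

-- B's stage 2 over an items list (with addPath rewritten to foldMAdd ∘ prefixKeys)
def expandD (l : List (List String × Int)) (p : PySem.Dict String Int) :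
    PySem.Dict String Int :=
  l.foldl (fun p t => foldMAdd (prefixKeys none t.1) t.2 p) p

-- ---- string side: A's joined prefixes = B's incremental prefixes ----

theorem chars_join_append_singleton (sep c : List Char) :
    ∀ (l : List (List Char)), l ≠ [] →
      PySem.Chars.join sep (l ++ [c]) = PySem.Chars.join sep l ++ sep ++ c
  | [], h => absurd rfl h
  | [x], _ => by
      simp [PySem.Chars.join_cons_cons, PySem.Chars.join_singleton]
  | x :: y :: rest, _ => by
      have ih := chars_join_append_singleton sep c (y :: rest) (by simp)
      simp only [List.cons_append, PySem.Chars.join_cons_cons] at *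
      simp [ih]

theorem join_singleton_str (d : String) : PySem.Str.join "/" [d] = d := by
  apply String.toList_inj.mp
  rw [PySem.Str.toList_join]
  exact PySem.Chars.join_singleton _ _

-- '/'.join(xs + [d]) = '/'.join(xs) + '/' + d  for nonempty xs
theorem join_last (xs : List String) (d : String) (h : xs ≠ []) :
    PySem.Str.join "/" (xs ++ [d]) =
      PySem.Str.join "" [PySem.Str.join "/" xs, "/", d] := by
  apply String.toList_inj.mp
  rw [PySem.Str.toList_join, PySem.Str.toList_join, List.map_append]
  rw [show List.map String.toList [d] = [d.toList] from rfl]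
  rw [chars_join_append_singleton _ _ _ (by simpa using h)]
  simp [PySem.Chars.join_cons_cons, PySem.Chars.join_singleton, PySem.Str.toList_join]

theorem prefixKeys_some (rest : List String) :
    ∀ (acc : List String), acc ≠ [] →
      prefixKeys (some (PySem.Str.join "/" acc)) rest =
        (List.range rest.length).map
          (fun i => PySem.Str.join "/" (acc ++ rest.take (i + 1))) := by
  induction rest with
  | nil => intro acc _; rfl
  | cons n rest ih =>
      intro acc hacc
      show (PySem.Str.join "" [PySem.Str.join "/" acc, "/", n]) ::
          prefixKeys (some (PySem.Str.join "" [PySem.Str.join "/" acc, "/", n])) rest = _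
      rw [← join_last acc n hacc]
      rw [ih (acc ++ [n]) (by simp)]
      simp only [List.length_cons]
      rw [List.range_succ_eq_map, List.map_cons, List.map_map]
      congr 1
      apply List.map_congr_left
      intro i _
      simp [Function.comp, List.take_succ_cons, List.append_assoc]

theorem prefixKeys_none_eq_pathsOf (s : List String) :
    prefixKeys none s = pathsOf s := by
  cases s with
  | nil => rfl
  | cons n rest =>
      show n :: prefixKeys (some n) rest = _
      unfold pathsOf
      simp only [List.length_cons]
      rw [List.range_succ_eq_map, List.map_cons, List.map_map]
      have h := prefixKeys_some rest [n] (by simp)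
      rw [join_singleton_str] at h
      rw [h]
      congr 1
      exact (join_singleton_str n).symm

-- A's per-file inner loop over range(1, len(stack)+1) is foldMAdd over pathsOf
theorem fold_file (stack : List String) (parsed : PySem.Dict String Int) (v : Int) :
    (PySem.List.pyRange 1 ((stack.length : Int) + 1) 1).foldl
        (fun p i =>
          p.modify (PySem.Str.join "/" (PySem.List.slice stack none (some i))) 0 (· + v))
        parsed
      = foldMAdd (pathsOf stack) v parsed := by
  unfold foldMAdd
  rw [PySem.List.pyRange_one]
  rw [show ((stack.length : Int) + 1 - 1).toNat = stack.length by omega]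
  unfold pathsOf
  rw [List.foldl_map, List.foldl_map]
  congr 1
  funext p k
  rw [PySem.List.slice_to stack (by omega)]
  rw [show ((1 : Int) + (k : Int)).toNat = k + 1 by omega]

-- B's addPath is foldMAdd over the incremental prefix keys
theorem addPath_aux (path : List String) :
    ∀ (cur : Option String) (p : PySem.Dict String Int) (v : Int),
      (path.foldl
        (fun st name =>
          let c := match st.2 with
            | none => name
            | some c0 => PySem.Str.join "" [c0, "/", name]
          (st.1.modify c 0 (· + v), some c))
        (p, cur)).1 = foldMAdd (prefixKeys cur path) v p := by
  induction path with
  | nil => intro cur p v; rfl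
  | cons n rest ih =>
      intro cur p v
      cases cur with
      | none => exact ih (some n) (p.modify n 0 (· + v)) v
      | some c0 =>
          exact ih (some (PySem.Str.join "" [c0, "/", n]))
            (p.modify (PySem.Str.join "" [c0, "/", n]) 0 (· + v)) v

theorem addPath_eq (p : PySem.Dict String Int) (path : List String) (v : Int) :
    addPath p path v = foldMAdd (prefixKeys none path) v p :=
  addPath_aux path none p v

-- ---- dict side: commuting additive modifies ----

-- two additive modifies at the same key collapse
theorem mAdd_mAdd_self (d : PySem.Dict String Int) (k : String) (a b : Int) :
    (d.modify k 0 (· + a)).modify k 0 (· + b) = d.modify k 0 (· + (a + b)) := by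
  show (d.insert k (d.getD k 0 + a)).insert k
      ((d.insert k (d.getD k 0 + a)).getD k 0 + b) = d.insert k (d.getD k 0 + (a + b))
  rw [PySem.Dict.getD_insert_self, PySem.Dict.insert_insert_self, add_assoc]

-- additive modify at a PRESENT key commutes with any additive modify
theorem mAdd_comm (d : PySem.Dict String Int) (k k' : String) (v w : Int)
    (hk : d.contains k = true) :
    (d.modify k 0 (· + v)).modify k' 0 (· + w)
      = (d.modify k' 0 (· + w)).modify k 0 (· + v) := by
  by_cases hkk : k' = k
  · subst hkk
    rw [mAdd_mAdd_self, mAdd_mAdd_self, add_comm]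
  · apply PySem.Dict.ext
    have hgk' : (d.modify k 0 (· + v)).getD k' 0 = d.getD k' 0 :=
      PySem.Dict.getD_modify_of_ne d 0 _ hkk
    have hgk : (d.modify k' 0 (· + w)).getD k 0 = d.getD k 0 :=
      PySem.Dict.getD_modify_of_ne d 0 _ (Ne.symm hkk)
    have hck' : (d.modify k 0 (· + v)).contains k' = d.contains k' := by
      rw [PySem.Dict.contains_modify]
      simp [hkk]
    have hck : (d.modify k' 0 (· + w)).contains k = true := by
      rw [PySem.Dict.contains_modify]
      simp [hk]
    have hitemsk : (d.modify k 0 (· + v)).items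
        = d.items.map (fun p => if p.1 == k then (k, d.getD k 0 + v) else p) :=
      PySem.Dict.items_insert_of_contains d _ hk
    have e1 : ((d.modify k 0 (· + v)).modify k' 0 (· + w)).items
        = ((d.modify k 0 (· + v)).insert k' (d.getD k' 0 + w)).items := by
      show ((d.modify k 0 (· + v)).insert k'
          ((d.modify k 0 (· + v)).getD k' 0 + w)).items = _
      rw [hgk']
    have e2 : ((d.modify k' 0 (· + w)).modify k 0 (· + v)).items
        = ((d.modify k' 0 (· + w)).insert k (d.getD k 0 + v)).items := by
      show ((d.modify k' 0 (· + w)).insert k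
          ((d.modify k' 0 (· + w)).getD k 0 + v)).items = _
      rw [hgk]
    rw [e1, e2]
    by_cases hk' : d.contains k' = true
    · have hitemsk' : (d.modify k' 0 (· + w)).items
          = d.items.map (fun p => if p.1 == k' then (k', d.getD k' 0 + w) else p) :=
        PySem.Dict.items_insert_of_contains d _ hk'
      rw [PySem.Dict.items_insert_of_contains _ _ (hck'.trans hk'),
          PySem.Dict.items_insert_of_contains _ _ hck,
          hitemsk, hitemsk', List.map_map, List.map_map]
      apply List.map_congr_left
      intro p _
      by_cases hp : p.1 = k
      · simp [Function.comp, hp, Ne.symm hkk]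
      · by_cases hp' : p.1 = k'
        · simp [Function.comp, hp', hkk]
        · simp [Function.comp, hp, hp']
    · have hck'' : (d.modify k 0 (· + v)).contains k' = false := by
        rw [hck']
        simpa using hk'
      have hd' : d.getD k' 0 = 0 :=
        PySem.Dict.getD_of_not_contains d 0 (by simpa using hk')
      have hitemsk'n : (d.modify k' 0 (· + w)).items = d.items ++ [(k', d.getD k' 0 + w)] :=
        PySem.Dict.items_insert_of_not_contains d _ (by simpa using hk')
      rw [PySem.Dict.items_insert_of_not_contains _ _ hck'',
          PySem.Dict.items_insert_of_contains _ _ hck,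
          hitemsk, hitemsk'n, List.map_append]
      congr 1
      simp only [List.map_cons, List.map_nil]
      rw [if_neg (by simp [hkk])]

-- an additive modify at a present key moves out of foldMAdd
theorem foldMAdd_modify (ks : List String) :
    ∀ (d : PySem.Dict String Int) (k : String) (v w : Int), d.contains k = true →
      foldMAdd ks w (d.modify k 0 (· + v)) = (foldMAdd ks w d).modify k 0 (· + v) := by
  induction ks with
  | nil => intro d k v w _; rfl
  | cons a ks ih =>
      intro d k v w hk
      show foldMAdd ks w ((d.modify k 0 (· + v)).modify a 0 (· + w)) = _
      rw [mAdd_comm d k a v w hk]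
      exact ih (d.modify a 0 (· + w)) k v w
        (by rw [PySem.Dict.contains_modify]; simp [hk])

theorem contains_foldMAdd_mono (ks : List String) :
    ∀ (d : PySem.Dict String Int) (v : Int) (k : String), d.contains k = true →
      (foldMAdd ks v d).contains k = true := by
  induction ks with
  | nil => intro d v k h; exact h
  | cons a ks ih =>
      intro d v k h
      exact ih _ v k (by rw [PySem.Dict.contains_modify]; simp [h])

theorem contains_foldMAdd_self (ks : List String) :
    ∀ (d : PySem.Dict String Int) (v : Int) (k : String), k ∈ ks →
      (foldMAdd ks v d).contains k = true := by
  induction ks with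
  | nil => intro d v k h; cases h
  | cons a ks ih =>
      intro d v k h
      rcases List.mem_cons.mp h with rfl | h
      · exact contains_foldMAdd_mono ks _ v k
          (by rw [PySem.Dict.contains_modify]; simp)
      · exact ih _ v k h

-- folding the sum = folding the parts (same key order both times)
theorem foldMAdd_add (ks : List String) :
    ∀ (P : PySem.Dict String Int) (v w : Int),
      foldMAdd ks (w + v) P = foldMAdd ks v (foldMAdd ks w P) := by
  induction ks with
  | nil => intro P v w; rfl
  | cons k ks ih =>
      intro P v w
      show foldMAdd ks (w + v) (P.modify k 0 (· + (w + v))) = _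
      rw [ih (P.modify k 0 (· + (w + v))) v w]
      rw [← mAdd_mAdd_self P k w v]
      rw [foldMAdd_modify ks (P.modify k 0 (· + w)) k v w
        (by rw [PySem.Dict.contains_modify]; simp)]
      rfl

theorem foldMAdd_foldMAdd_comm (ks : List String) :
    ∀ (d : PySem.Dict String Int) (ks' : List String) (u v : Int),
      (∀ k ∈ ks, d.contains k = true) →
      foldMAdd ks' u (foldMAdd ks v d) = foldMAdd ks v (foldMAdd ks' u d) := by
  induction ks with
  | nil => intro d ks' u v _; rfl
  | cons k ks ih =>
      intro d ks' u v h
      show foldMAdd ks' u (foldMAdd ks v (d.modify k 0 (· + v))) = _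
      rw [ih (d.modify k 0 (· + v)) ks' u v
        (fun a ha => by rw [PySem.Dict.contains_modify]; simp [h a (List.mem_cons_of_mem _ ha)])]
      rw [foldMAdd_modify ks' (d) k v u (h k (List.mem_cons_self ..))]
      rfl

-- stage 2 commutes with a foldMAdd whose keys are already present
theorem expandD_foldMAdd (l : List (List String × Int)) :
    ∀ (d : PySem.Dict String Int) (ks : List String) (v : Int),
      (∀ k ∈ ks, d.contains k = true) →
      expandD l (foldMAdd ks v d) = foldMAdd ks v (expandD l d) := by
  induction l with
  | nil => intro d ks v _; rfl
  | cons t l ih =>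
      intro d ks v h
      show expandD l (foldMAdd (prefixKeys none t.1) t.2 (foldMAdd ks v d)) = _
      rw [foldMAdd_foldMAdd_comm ks d (prefixKeys none t.1) t.2 v h]
      exact ih _ ks v (fun k hk => contains_foldMAdd_mono _ _ _ k (h k hk))

-- bumping the (unique) entry at s inside the items list = foldMAdd after stage 2
theorem expandD_bump (l : List (List String × Int)) :
    ∀ (p : PySem.Dict String Int) (s : List String) (v : Int),
      (l.map Prod.fst).Nodup → s ∈ l.map Prod.fst →
      expandD (l.map (fun t => if t.1 == s then (s, t.2 + v) else t)) p
        = foldMAdd (prefixKeys none s) v (expandD l p) := by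
  induction l with
  | nil => intro p s v _ h; cases h
  | cons t l ih =>
      intro p s v hnd hmem
      by_cases hts : t.1 = s
      · subst hts
        have hnotin : t.1 ∉ l.map Prod.fst := (List.nodup_cons.mp hnd).1
        have hmap : l.map (fun u => if u.1 == t.1 then (t.1, u.2 + v) else u) = l := by
          rw [show l.map (fun u => if u.1 == t.1 then (t.1, u.2 + v) else u) = l.map id from
            List.map_congr_left (fun u hu => by
              have : u.1 ≠ t.1 := fun h => hnotin (h ▸ List.mem_map_of_mem hu)
              simp [this])]
          exact List.map_id l
        show expandD ((if t.1 == t.1 then (t.1, t.2 + v) else t) ::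
            l.map (fun u => if u.1 == t.1 then (t.1, u.2 + v) else u)) p = _
        rw [hmap, if_pos (by simp)]
        show expandD l (foldMAdd (prefixKeys none t.1) (t.2 + v) p) = _
        rw [foldMAdd_add (prefixKeys none t.1) p v t.2]
        rw [expandD_foldMAdd l _ (prefixKeys none t.1) v
          (fun k hk => contains_foldMAdd_self _ _ _ k hk)]
        rfl
      · have hmem' : s ∈ l.map Prod.fst := by
          rcases List.mem_cons.mp hmem with h | h
          · exact absurd h.symm hts
          · exact h
        show expandD ((if t.1 == s then (s, t.2 + v) else t) ::
            l.map (fun u => if u.1 == s then (s, u.2 + v) else u)) p = _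
        rw [if_neg (by simp [hts])]
        show expandD (l.map (fun u => if u.1 == s then (s, u.2 + v) else u))
            (foldMAdd (prefixKeys none t.1) t.2 p) = _
        rw [ih _ s v (List.nodup_cons.mp hnd).2 hmem']
        rfl

-- the key step: bumping `direct` at s = foldMAdd over s's prefixes after stage 2
theorem expandD_modify (direct : PySem.Dict (List String) Int) (s : List String) (v : Int)
    (hnd : direct.keys.Nodup) :
    expandD ((direct.modify s 0 (· + v)).items) PySem.Dict.empty
      = foldMAdd (prefixKeys none s) v (expandD direct.items PySem.Dict.empty) := by
  by_cases hc : direct.contains s = true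
  · show expandD ((direct.insert s (direct.getD s 0 + v)).items) _ = _
    rw [PySem.Dict.items_insert_of_contains direct _ hc]
    have hmapeq : direct.items.map (fun p => if p.1 == s then (s, direct.getD s 0 + v) else p)
        = direct.items.map (fun t => if t.1 == s then (s, t.2 + v) else t) := by
      apply List.map_congr_left
      intro p hp
      by_cases hps : p.1 = s
      · have : direct.get? p.1 = some p.2 := by
          rcases p with ⟨k, w⟩
          exact PySem.Dict.get?_of_mem_items direct hp hnd
        have hgd : direct.getD s 0 = p.2 := by
          rw [← hps]
          rw [PySem.Dict.getD_eq_get?_getD, this]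
          rfl
        simp [hps, hgd]
      · simp [hps]
    rw [hmapeq]
    apply expandD_bump
    · exact hnd
    · exact (PySem.Dict.contains_iff_mem_keys direct s).mp hc
  · show expandD ((direct.insert s (direct.getD s 0 + v)).items) _ = _
    rw [PySem.Dict.items_insert_of_not_contains direct _ (by simpa using hc),
        PySem.Dict.getD_of_not_contains direct 0 (by simpa using hc)]
    show (direct.items ++ [(s, 0 + v)]).foldl _ _ = _
    rw [List.foldl_append]
    show foldMAdd (prefixKeys none s) (0 + v) (expandD direct.items PySem.Dict.empty) = _
    rw [zero_add]

-- one loop iteration preserves the simulation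
theorem step_main (direct : PySem.Dict (List String) Int) (stack : List String)
    (line : String) (hnd : direct.keys.Nodup) :
    parseStepA (expandD direct.items PySem.Dict.empty, stack) line
      = (expandD ((parseStepB (direct, stack) line).1).items PySem.Dict.empty,
         (parseStepB (direct, stack) line).2) := by
  unfold parseStepA parseStepB
  simp only []
  split
  · rfl
  · rfl
  · rfl
  · rfl
  case h_5 size _ _ =>
    by_cases h : stack = []
    · subst h
      show ((PySem.List.pyRange 1 1 1).foldl _ _, ([] : List String)) = _
      simp [PySem.List.pyRange_one_eq_nil]
    · rw [fold_file]
      rw [← prefixKeys_none_eq_pathsOf]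
      rw [if_neg (by simpa [List.isEmpty_iff] using h)]
      show (_, stack) = (_, stack)
      rw [expandD_modify direct stack _ hnd]
  · rfl

-- keys of direct stay Nodup through stage 1
theorem nodup_stepB (direct : PySem.Dict (List String) Int) (stack : List String)
    (line : String) (hnd : direct.keys.Nodup) :
    ((parseStepB (direct, stack) line).1).keys.Nodup := by
  unfold parseStepB
  simp only []
  split
  · exact hnd
  · exact hnd
  · exact hnd
  · exact hnd
  · split
    · exact hnd
    · show ((direct.insert _ _)).keys.Nodup
      exact PySem.Dict.nodup_keys_insert direct _ _ hnd
  · exact hnd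

-- the loop invariant, folded over the whole command list
theorem fold_main (cmds : List String) :
    ∀ (direct : PySem.Dict (List String) Int) (stack : List String), direct.keys.Nodup →
      cmds.foldl parseStepA (expandD direct.items PySem.Dict.empty, stack)
        = (expandD ((cmds.foldl parseStepB (direct, stack)).1).items PySem.Dict.empty,
           (cmds.foldl parseStepB (direct, stack)).2) := by
  induction cmds with
  | nil => intro direct stack _; rfl
  | cons line rest ih =>
      intro direct stack hnd
      simp only [List.foldl_cons]
      rw [step_main direct stack line hnd]
      exact ih _ _ (nodup_stepB direct stack line hnd)

-- ===== VERDICT (by name: the statement is the Claim_ definition above) =====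
theorem addPath_fold_eq (l : List (List String × Int)) (p : PySem.Dict String Int) :
    l.foldl (fun parsed pt => addPath parsed pt.1 pt.2) p = expandD l p := by
  unfold expandD
  simp only [addPath_eq]

theorem parse_spec : Claim_equal_parse := by
  intro commands _ _
  unfold Spec_parse parse parse_alt
  show _ = (List.foldl (fun parsed pt => addPath parsed pt.1 pt.2) PySem.Dict.empty
      ((List.foldl parseStepB (PySem.Dict.empty, []) commands).1.items)).items
  rw [addPath_fold_eq]
  have h := fold_main commands PySem.Dict.empty [] (by exact PySem.Dict.nodup_keys_empty)
  rw [show expandD (PySem.Dict.empty : PySem.Dict (List String) Int).items PySem.Dict.empty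
      = (PySem.Dict.empty : PySem.Dict String Int) from rfl] at h
  rw [h]
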